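-- pv_equiv track=rewrite | github.com/pypi-data/pypi-mirror-346 | packages/construct-tracker/construct_tracker-1.0.16.tar.gz/construct_tracker-1.0.16/src/construct_tracker/lexicon.py | remove_tokens_containing_token
-- ===== SOURCE A (Python) =====
-- from typing import Any, Dict, List, Optional, Tuple, Union
--
-- def find_partial_matching_strings(list_a: List[str], list_b: List[str]) -> Tuple[List[str], Dict[str, str]]:
--     """Find strings in list_a that contain any of the strings in list_b, excluding exact matches.
--
--     Args:
--                                     list_a: List of strings to search within.
--                                     list_b: List of substrings to search for.
--
--     Returns:
--                                     A tuple of lists containing partial matches and matched substrings.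
--     """
--     partial_matching_strings = []
--     matched_substrings = {}
--     for string_a in list_a:
--         for string_b in list_b:
--             if string_b in string_a and string_a != string_b:
--                 partial_matching_strings.append(string_a)
--                 matched_substrings[string_a] = string_b
--     return partial_matching_strings, matched_substrings
--
-- def remove_tokens_containing_token(tokens: List[str], except_exact_match: Optional[List[str]] = None) -> List[str]:
--     """Remove tokens that contain other tokens, except for exact matches.
--
--
--     Args:
--                                     tokens: List of tokens to filter.
--                                     except_exact_match: Optional; list of tokens to exclude from filtering.
--
--     Returns:
--                                     The filtered list of tokens.
--
--     Example:
--                     remove_tokens_containing_token(['mourn', 'mourning', 'beat', 'beating'],  except_exact_match = ['beat'])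
--                     # Should keep beat and beating because beat is in except_exact_match, so it won't be redundant if you search for both.
--     """
--     if len(except_exact_match) > 0:
--         tokens_substrings = [n for n in tokens if n not in except_exact_match]
--         partial_matching_strings, matched_substrings = find_partial_matching_strings(tokens, tokens_substrings)
--         # partial matching strings contain other strings, so they are redundant
--     else:
--         partial_matching_strings, matched_substrings = find_partial_matching_strings(tokens, tokens)
--         # partial matching strings contain other strings, so they are redundant
--     tokens = [n for n in tokens if n not in partial_matching_strings]  # remove tokens containing tokens
--     return tokens
-- ===== SOURCE B (Python) =====
-- def remove_tokens_containing_token(tokens, except_exact_match=None):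
--     # Substring-enumeration: build the candidate set once, then for each token
--     # test each of its O(L^2) slices for membership, instead of scanning all
--     # other tokens for each token.
--     candidates = set(tokens).difference(except_exact_match)
--     kept = []
--     for t in tokens:
--         n = len(t)
--         redundant = any(t[i:j] in candidates
--                         for i in range(n + 1)
--                         for j in range(i, n + 1)
--                         if (i, j) != (0, n))
--         if not redundant:
--             kept.append(t)
--     return kept
-- ===== Notes on version B (the rewrite author's own statement) =====
-- stated objective: faster
-- what changed: A builds a redundant-token list by a nested scan of every token against every candidate token and then rescans that possibly quadratic-length list to filter; B builds the candidate set once and, for each token, enumerates the token's own slices and tests each for set membership, so no token-against-token scan remains and cost per token no longer grows with the number of tokens.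
import Mathlib
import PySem

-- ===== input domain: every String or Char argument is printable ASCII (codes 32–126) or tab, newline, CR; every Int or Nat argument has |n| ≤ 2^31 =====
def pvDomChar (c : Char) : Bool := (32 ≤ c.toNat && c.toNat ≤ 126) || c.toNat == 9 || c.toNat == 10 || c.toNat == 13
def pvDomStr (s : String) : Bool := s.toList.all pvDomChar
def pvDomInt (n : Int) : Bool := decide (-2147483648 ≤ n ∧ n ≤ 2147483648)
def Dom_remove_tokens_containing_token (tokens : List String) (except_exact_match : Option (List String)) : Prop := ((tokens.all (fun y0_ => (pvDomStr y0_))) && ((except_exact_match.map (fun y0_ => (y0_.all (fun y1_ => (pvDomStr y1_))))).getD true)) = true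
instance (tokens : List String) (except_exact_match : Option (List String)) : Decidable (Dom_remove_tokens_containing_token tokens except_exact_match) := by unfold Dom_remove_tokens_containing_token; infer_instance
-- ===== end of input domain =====

-- B replaces A's token-against-token nested scan (plus a rescan of the collected
-- redundant list) by one candidate set built up front and, per token, a membership
-- test of each of the token's slices (objective: faster; measured so in a timing run).

-- ===== PORT A =====
def find_partial_matching_strings (list_a list_b : List String) :
    List String × PySem.Dict String String :=
  list_a.foldl (fun acc string_a =>
    list_b.foldl (fun acc2 string_b =>
      if PySem.Str.isIn string_b string_a && string_a != string_b then
        (acc2.1 ++ [string_a], acc2.2.insert string_a string_b)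
      else acc2) acc) ([], PySem.Dict.empty)

def remove_tokens_containing_token (tokens : List String)
    (except_exact_match : Option (List String)) : List String :=
  match except_exact_match with
  | none => []  -- Python raises TypeError on len(None); excluded by Pre_
  | some ex =>
    let partial_matching_strings :=
      if ex.length > 0 then
        let tokens_substrings := tokens.filter (fun n => !ex.contains n)
        (find_partial_matching_strings tokens tokens_substrings).1
      else
        (find_partial_matching_strings tokens tokens).1
    tokens.filter (fun n => !partial_matching_strings.contains n)

-- ===== PORT B =====
def remove_tokens_containing_token_alt (tokens : List String)
    (except_exact_match : Option (List String)) : List String :=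
  match except_exact_match with
  | none => []  -- Python B raises TypeError on set(tokens).difference(None); excluded by Pre_
  | some ex =>
    let candidates : PySem.Set String :=
      PySem.Set.diff (PySem.Set.ofList tokens) ex
    tokens.foldl (fun kept t =>
      let n : Int := PySem.Str.len t
      let redundant :=
        (PySem.List.pyRange 0 (n + 1) 1).any (fun i =>
          (PySem.List.pyRange i (n + 1) 1).any (fun j =>
            ((i, j) != ((0 : Int), n)) &&
              PySem.Set.contains candidates (PySem.Str.slice t (some i) (some j))))
      if !redundant then kept ++ [t] else kept) []

-- ===== PRECONDITION & SPEC =====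
-- Pre_ excludes only except_exact_match = None, on which A raises TypeError (len(None)).
def Pre_remove_tokens_containing_token (tokens : List String) (except_exact_match : Option (List String)) : Prop :=
  except_exact_match.isSome = true
instance (tokens : List String) (except_exact_match : Option (List String)) : Decidable (Pre_remove_tokens_containing_token tokens except_exact_match) := by unfold Pre_remove_tokens_containing_token; infer_instance

def pvWitness_remove_tokens_containing_token : List String × Option (List String) :=
  (["mourn", "mourning", "beat", "beating"], some ["beat"])

def Spec_remove_tokens_containing_token (tokens : List String) (except_exact_match : Option (List String)) (out : List String) : Prop := out = remove_tokens_containing_token_alt tokens except_exact_match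
instance (tokens : List String) (except_exact_match : Option (List String)) (out : List String) : Decidable (Spec_remove_tokens_containing_token tokens except_exact_match out) := by unfold Spec_remove_tokens_containing_token; infer_instance

-- ===== CLAIM (what is proved, stated in full; the proofs are below) =====
def Claim_equal_remove_tokens_containing_token : Prop := ∀ (tokens : List String) (except_exact_match : Option (List String)), Dom_remove_tokens_containing_token tokens except_exact_match → Pre_remove_tokens_containing_token tokens except_exact_match → Spec_remove_tokens_containing_token tokens except_exact_match (remove_tokens_containing_token tokens except_exact_match)

-- ===== LEMMAS AND PROOFS =====

-- membership in the first component of A's inner fold (one fixed string_a)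
lemma mem_inner_fold (sa : String) (lb : List String)
    (acc : List String × PySem.Dict String String) (x : String) :
    x ∈ (lb.foldl (fun acc2 sb =>
      if PySem.Str.isIn sb sa && sa != sb then
        (acc2.1 ++ [sa], acc2.2.insert sa sb)
      else acc2) acc).1 ↔
    x ∈ acc.1 ∨ (x = sa ∧ ∃ c ∈ lb, PySem.Str.isIn c sa ∧ c ≠ sa) := by
  induction lb generalizing acc with
  | nil => simp
  | cons b t ih =>
    simp only [List.foldl_cons]
    by_cases h : (PySem.Str.isIn b sa && sa != b) = true
    · rw [if_pos h, ih]
      simp only [bne_iff_ne, Bool.and_eq_true, ne_eq] at h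
      simp only [List.mem_append, List.mem_cons, List.not_mem_nil, or_false]
      constructor
      · rintro (⟨hx | hx⟩ | ⟨rfl, c, hc, h1, h2⟩)
        · exact Or.inl hx
        · exact Or.inr ⟨hx, b, Or.inl rfl, h.1, fun e => h.2 e.symm⟩
        · exact Or.inr ⟨rfl, c, Or.inr hc, h1, h2⟩
      · rintro (hx | ⟨rfl, c, (rfl | hc), h1, h2⟩)
        · exact Or.inl (Or.inl hx)
        · exact Or.inl (Or.inr rfl)
        · exact Or.inr ⟨rfl, c, hc, h1, h2⟩
    · rw [if_neg h, ih]
      simp only [bne_iff_ne, Bool.and_eq_true, ne_eq, not_and] at h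
      simp only [List.mem_cons]
      constructor
      · rintro (hx | ⟨rfl, c, hc, h1, h2⟩)
        · exact Or.inl hx
        · exact Or.inr ⟨rfl, c, Or.inr hc, h1, h2⟩
      · rintro (hx | ⟨rfl, c, (rfl | hc), h1, h2⟩)
        · exact Or.inl hx
        · cases h2 (by
            by_contra hne
            have := h h1
            simp at this
            exact hne this.symm)
        · exact Or.inr ⟨rfl, c, hc, h1, h2⟩

-- membership in A's partial_matching_strings
lemma mem_fpms (la lb : List String) (x : String) :
    x ∈ (find_partial_matching_strings la lb).1 ↔
    x ∈ la ∧ ∃ c ∈ lb, PySem.Str.isIn c x ∧ c ≠ x := by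
  unfold find_partial_matching_strings
  suffices h : ∀ acc : List String × PySem.Dict String String,
      x ∈ (la.foldl (fun acc sa =>
        lb.foldl (fun acc2 sb =>
          if PySem.Str.isIn sb sa && sa != sb then
            (acc2.1 ++ [sa], acc2.2.insert sa sb)
          else acc2) acc) acc).1 ↔
      x ∈ acc.1 ∨ (x ∈ la ∧ ∃ c ∈ lb, PySem.Str.isIn c x ∧ c ≠ x) by
    rw [h ([], (PySem.Dict.empty : PySem.Dict String String))]; simp
  induction la with
  | nil => simp
  | cons a t ih =>
    intro acc
    simp only [List.foldl_cons]
    rw [ih, mem_inner_fold]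
    simp only [List.mem_cons]
    constructor
    · rintro ((hx | ⟨rfl, hc⟩) | ⟨hx, hc⟩)
      · exact Or.inl hx
      · exact Or.inr ⟨Or.inl rfl, hc⟩
      · exact Or.inr ⟨Or.inr hx, hc⟩
    · rintro (hx | ⟨(rfl | hx), hc⟩)
      · exact Or.inl (Or.inl hx)
      · exact Or.inl (Or.inr ⟨rfl, hc⟩)
      · exact Or.inr ⟨hx, hc⟩

-- a slice with natural in-range bounds is an infix
lemma slice_isInfix (xs : List Char) (a b : Nat) : (xs.drop a).take b <:+: xs :=
  ((xs.drop a).take_prefix b).isInfix.trans (xs.drop_suffix a).isInfix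

-- B's slice-enumeration test ⟺ "some candidate is a proper substring of t"
lemma alt_any_iff (cand : List String) (t : String) :
    ((PySem.List.pyRange 0 ((t.toList.length : Int) + 1) 1).any (fun i =>
      (PySem.List.pyRange i ((t.toList.length : Int) + 1) 1).any (fun j =>
        ((i, j) != ((0 : Int), (t.toList.length : Int))) &&
          PySem.Set.contains cand (PySem.Str.slice t (some i) (some j))))) = true ↔
    ∃ c ∈ cand, PySem.Str.isIn c t = true ∧ c ≠ t := by
  set n : Nat := t.toList.length with hn
  constructor
  · intro h
    rw [List.any_eq_true] at h
    obtain ⟨i, hi, h⟩ := h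
    rw [List.any_eq_true] at h
    obtain ⟨j, hj, h⟩ := h
    rw [Bool.and_eq_true] at h
    obtain ⟨hne, hc⟩ := h
    rw [PySem.List.mem_pyRange_one] at hi hj
    obtain ⟨i, rfl⟩ : ∃ i' : Nat, i = (i' : Int) := ⟨i.toNat, by omega⟩
    obtain ⟨j, rfl⟩ : ∃ j' : Nat, j = (j' : Int) := ⟨j.toNat, by omega⟩
    have hij : i ≤ j := by exact_mod_cast hj.1
    have hjn : j ≤ n := by omega
    refine ⟨PySem.Str.slice t (some (i : Int)) (some (j : Int)), (PySem.Set.contains_iff _ _).1 hc, ?_, ?_⟩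
    · rw [PySem.Str.isIn_iff_infix]
      have : (PySem.Str.slice t (some (i : Int)) (some (j : Int))).toList
          = (t.toList.drop i).take (j - i) := by
        simp [PySem.List.slice_natCast]
      rw [this]
      exact slice_isInfix _ _ _
    · intro he
      have hlen : ((t.toList.drop i).take (j - i)).length = n := by
        have := congrArg (fun s => s.toList.length) he
        simpa [PySem.List.slice_natCast] using this
      rw [List.length_take, List.length_drop] at hlen
      have : i = 0 ∧ j = n := by omega
      simp [this.1, this.2] at hne
  · rintro ⟨c, hc, hin, hne⟩
    rw [PySem.Str.isIn_iff_infix] at hin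
    obtain ⟨pre, suf, hsplit⟩ := hin
    have hlens : pre.length + c.toList.length + suf.length = n := by
      have := congrArg List.length hsplit
      simpa only [List.length_append, hn] using this
    rw [List.any_eq_true]
    refine ⟨(pre.length : Int), ?_, ?_⟩
    · rw [PySem.List.mem_pyRange_one]
      omega
    · rw [List.any_eq_true]
      refine ⟨(pre.length : Int) + (c.toList.length : Int), ?_, ?_⟩
      · rw [PySem.List.mem_pyRange_one]
        omega
      · rw [Bool.and_eq_true]
        have hslice : PySem.List.slice t.toList (some (pre.length : Int))
            (some ((pre.length : Int) + (c.toList.length : Int))) = c.toList := by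
          rw [PySem.List.slice_natCast_add, ← hsplit]
          simp
        constructor
        · rw [bne_iff_ne]
          intro he
          have h1 : (pre.length : Int) = 0 := congrArg Prod.fst he
          have h2 : (pre.length : Int) + (c.toList.length : Int) = (n : Int) := congrArg Prod.snd he
          have hp0 : pre.length = 0 := by exact_mod_cast h1
          have hsuf : suf.length = 0 := by omega
          rw [List.eq_nil_of_length_eq_zero hp0, List.eq_nil_of_length_eq_zero hsuf] at hsplit
          simp at hsplit
          exact hne (String.toList_inj.mp hsplit)
        · rw [PySem.Set.contains_iff]
          have : PySem.Str.slice t (some (pre.length : Int))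
              (some ((pre.length : Int) + (c.toList.length : Int))) = c := by
            apply String.toList_inj.mp
            rw [PySem.Str.toList_slice, PySem.Chars.slice_eq_listSlice, hslice]
          rw [this]
          exact hc
-- both programs keep exactly the tokens with no proper-substring candidate
lemma main_eq (tokens cl : List String) (cand : PySem.Set String)
    (hmem : ∀ x, x ∈ cand ↔ x ∈ cl) :
    tokens.filter (fun n => !(find_partial_matching_strings tokens cl).1.contains n) =
    tokens.foldl (fun kept t =>
      let n : Int := PySem.Str.len t
      if !((PySem.List.pyRange 0 (n + 1) 1).any (fun i =>
          (PySem.List.pyRange i (n + 1) 1).any (fun j =>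
            ((i, j) != ((0 : Int), n)) &&
              PySem.Set.contains cand (PySem.Str.slice t (some i) (some j))))) then
        kept ++ [t] else kept) [] := by
  rw [PySem.List.foldl_append_if_eq_filter]
  rw [List.nil_append]
  apply List.filter_congr
  intro t ht
  congr 1
  rw [Bool.eq_iff_iff, List.contains_iff_mem, mem_fpms]
  simp only [PySem.Str.len_eq]
  rw [alt_any_iff cand t]
  constructor
  · rintro ⟨_, c, hc, h1, h2⟩
    exact ⟨c, (hmem c).2 hc, h1, h2⟩
  · rintro ⟨c, hc, h1, h2⟩
    exact ⟨ht, c, (hmem c).1 hc, h1, h2⟩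

-- ===== VERDICT (by name: the statement is the Claim_ definition above) =====
theorem remove_tokens_containing_token_spec : Claim_equal_remove_tokens_containing_token := by
  intro tokens ex hdom hpre
  unfold Spec_remove_tokens_containing_token
  cases ex with
  | none => simp [Pre_remove_tokens_containing_token] at hpre
  | some ex =>
    unfold remove_tokens_containing_token remove_tokens_containing_token_alt
    simp only
    have hmem : ∀ x, x ∈ PySem.Set.diff (PySem.Set.ofList tokens) ex ↔
        x ∈ tokens.filter (fun n => !ex.contains n) := by
      intro x
      rw [PySem.Set.mem_diff, PySem.Set.mem_ofList, List.mem_filter]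
      simp
    by_cases hex : ex.length > 0
    · rw [if_pos (by simpa using hex)]
      exact main_eq tokens (tokens.filter (fun n => !ex.contains n)) _ hmem
    · rw [if_neg (by simpa using hex)]
      have hnil : ex = [] := by
        cases ex with
        | nil => rfl
        | cons a t => simp at hex
      subst hnil
      have hmem' : ∀ x, x ∈ PySem.Set.diff (PySem.Set.ofList tokens) ([] : List String) ↔
          x ∈ tokens := by
        intro x
        rw [PySem.Set.mem_diff, PySem.Set.mem_ofList]
        simp
      exact main_eq tokens tokens _ hmem'
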